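-- pv_equiv track=rewrite | github.com/jeff87654/Lifting | build_sn_topt.py | combos_for_partition
-- ===== SOURCE A (Python) =====
-- def combos_for_partition(partition, num_transitive):
--     """Enumerate combos = list of (d, t) tuples.  For repeated d's, t's are
--     sorted ascending so each S_n-equivalence class is enumerated exactly once.
--
--     `num_transitive` is a dict {d: NrTransitiveGroups(d)}."""
--     # Group by degree
--     by_d = {}
--     for d in partition:
--         by_d[d] = by_d.get(d, 0) + 1
--     degrees = sorted(by_d.keys())
--
--     # For each distinct degree d with multiplicity m, choose a multiset of size m
--     # from {1..num_transitive[d]} (with repetition, sorted ascending).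
--     def multisets(items, k):
--         if k == 0:
--             yield ()
--             return
--         for i, x in enumerate(items):
--             for rest in multisets(items[i:], k - 1):
--                 yield (x,) + rest
--
--     def cartesian(degs):
--         if not degs:
--             yield []
--             return
--         d = degs[0]
--         rest = degs[1:]
--         for ts in multisets(list(range(1, num_transitive[d] + 1)), by_d[d]):
--             for tail in cartesian(rest):
--                 yield [(d, t) for t in ts] + tail
--
--     for combo in cartesian(degrees):
--         yield tuple(sorted(combo))
-- ===== SOURCE B (Python) =====
-- def combos_for_partition(partition, num_transitive):
--     """Same enumeration as A, but built iteratively: precompute per-degree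
--     choice lists (via a head/tail combinations-with-replacement helper), then
--     fold an iterative cartesian product over them."""
--     by_d = {}
--     for d in partition:
--         by_d[d] = by_d.get(d, 0) + 1
--
--     def cwr(items, k):
--         # combinations with replacement of size k, in lexicographic order
--         if k == 0:
--             return [()]
--         if not items:
--             return []
--         x = items[0]
--         return [(x,) + t for t in cwr(items, k - 1)] + cwr(items[1:], k)
--
--     choices = [
--         [tuple((d, t) for t in ts)
--          for ts in cwr(list(range(1, num_transitive[d] + 1)), by_d[d])]
--         for d in sorted(by_d)
--     ]
--     prods = [()]
--     for c in choices:
--         prods = [p + g for p in prods for g in c]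
--     for combo in prods:
--         yield tuple(sorted(combo))
-- ===== Notes on version B (the rewrite author's own statement) =====
-- stated objective: alternative
-- what changed: A's two nested recursive generators (enumerate/slice multisets inside a recursive cartesian generator) are replaced by a head/tail combinations-with-replacement helper, precomputed per-degree choice lists, and an iterative fold building the cartesian product.
-- outside the precondition, e.g. on combos_for_partition([-1, 7, -1, 2], {-1: -17, 0: 10, 2: 5}): A returns [], B raises KeyError
import Mathlib
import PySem

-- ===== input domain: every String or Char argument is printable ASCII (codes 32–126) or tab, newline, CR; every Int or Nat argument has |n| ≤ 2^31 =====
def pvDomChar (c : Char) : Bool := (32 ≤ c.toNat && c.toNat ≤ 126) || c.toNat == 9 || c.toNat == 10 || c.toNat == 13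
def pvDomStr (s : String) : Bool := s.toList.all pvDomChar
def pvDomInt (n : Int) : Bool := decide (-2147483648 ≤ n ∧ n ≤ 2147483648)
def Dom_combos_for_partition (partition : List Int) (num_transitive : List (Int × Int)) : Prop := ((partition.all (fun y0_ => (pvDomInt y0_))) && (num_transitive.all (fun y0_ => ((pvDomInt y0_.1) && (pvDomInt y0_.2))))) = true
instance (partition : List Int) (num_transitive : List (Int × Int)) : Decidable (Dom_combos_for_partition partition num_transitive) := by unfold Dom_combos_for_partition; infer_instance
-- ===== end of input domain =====

-- B replaces A's two nested recursive generators by a head/tail combinations-with-replacement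
-- helper plus an iterative cartesian-product fold over precomputed per-degree choice lists
-- (same sequence, same order; objective: alternative decomposition).


-- ===== PORT A =====
-- multisets(items, k): for i, x in enumerate(items): for rest in multisets(items[i:], k-1): yield (x,)+rest
-- (k is the multiplicity count, always ≥ 0, so the Python int k is carried as Nat)
def multisetsA (items : List Int) (k : Nat) : List (List Int) :=
  match k with
  | 0 => [[]]
  | Nat.succ k' =>
    (PySem.List.enumerate items 0).flatMap (fun ix =>
      (multisetsA (PySem.List.slice items (some ix.1) none) k').map (fun rest => ix.2 :: rest))

-- cartesian(degs): recursion over degs with per-level multisets; dict lookups via getD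
-- (inside Pre_ every key is present, so the default 0 is never read where Python would raise)
def cartesianA (nt : PySem.Dict Int Int) (byd : PySem.Dict Int Int) : List Int → List (List (Int × Int))
  | [] => [[]]
  | d :: rest =>
    (multisetsA (PySem.List.pyRange 1 (nt.getD d 0 + 1) 1) (byd.getD d 0).toNat).flatMap
      (fun ts => (cartesianA nt byd rest).map (fun tail => ts.map (fun t => (d, t)) ++ tail))

def combos_for_partition (partition : List Int) (num_transitive : List (Int × Int)) : List (List (Int × Int)) :=
  let byd := partition.foldl (fun dd d => dd.insert d (dd.getD d 0 + 1)) (PySem.Dict.empty : PySem.Dict Int Int)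
  let degrees := PySem.List.sorted byd.keys (fun x => x) false
  (cartesianA (PySem.Dict.mk num_transitive) byd degrees).map
    (fun combo => PySem.List.sorted2 combo (fun p => p.1) (fun p => p.2) false)

-- ===== PORT B =====
-- cwr(items, k): head/tail recursion: [(x,)+t for t in cwr(items,k-1)] + cwr(items[1:], k)
def cwrB (items : List Int) (k : Nat) : List (List Int) :=
  match items, k with
  | _, 0 => [[]]
  | [], _ + 1 => []
  | x :: rest, Nat.succ k' => ((cwrB (x :: rest) k').map (fun t => x :: t)) ++ cwrB rest (k' + 1)
termination_by k + items.length

def combos_for_partition_alt (partition : List Int) (num_transitive : List (Int × Int)) : List (List (Int × Int)) :=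
  let byd := partition.foldl (fun dd d => dd.insert d (dd.getD d 0 + 1)) (PySem.Dict.empty : PySem.Dict Int Int)
  let choices := (PySem.List.sorted byd.keys (fun x => x) false).map (fun d =>
    (cwrB (PySem.List.pyRange 1 ((PySem.Dict.mk num_transitive).getD d 0 + 1) 1) (byd.getD d 0).toNat).map
      (fun ts => ts.map (fun t => (d, t))))
  let prods := choices.foldl (fun ps c => ps.flatMap (fun p => c.map (fun g => p ++ g))) [[]]
  prods.map (fun combo => PySem.List.sorted2 combo (fun p => p.1) (fun p => p.2) false)

-- ===== PRECONDITION & SPEC =====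
-- Pre_ excludes inputs with a partition degree missing from the num_transitive dict: there A
-- raises KeyError, except when an earlier degree's empty option list makes the lazy generator
-- short-circuit to [] before the lookup — an artefact of generator laziness; B raises KeyError.
def Pre_combos_for_partition (partition : List Int) (num_transitive : List (Int × Int)) : Prop :=
  ∀ d ∈ partition, d ∈ num_transitive.map (fun p => p.1)
instance (partition : List Int) (num_transitive : List (Int × Int)) : Decidable (Pre_combos_for_partition partition num_transitive) := by unfold Pre_combos_for_partition; infer_instance

def pvWitness_combos_for_partition : List Int × (List (Int × Int)) := ([2, 2, 3], [(2, 1), (3, 2)])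

def Spec_combos_for_partition (partition : List Int) (num_transitive : List (Int × Int)) (out : List (List (Int × Int))) : Prop := out = combos_for_partition_alt partition num_transitive
instance (partition : List Int) (num_transitive : List (Int × Int)) (out : List (List (Int × Int))) : Decidable (Spec_combos_for_partition partition num_transitive out) := by unfold Spec_combos_for_partition; infer_instance

-- ===== CLAIM (what is proved, stated in full; the proofs are below) =====
def Claim_equal_combos_for_partition : Prop := ∀ (partition : List Int) (num_transitive : List (Int × Int)), Dom_combos_for_partition partition num_transitive → Pre_combos_for_partition partition num_transitive → Spec_combos_for_partition partition num_transitive (combos_for_partition partition num_transitive)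

-- ===== LEMMAS AND PROOFS =====

-- shifting the start of enumerate
lemma enumerate_shift {α : Type} (xs : List α) (s : Int) :
    PySem.List.enumerate xs (s + 1) = (PySem.List.enumerate xs s).map (fun p => (p.1 + 1, p.2)) := by
  induction xs generalizing s with
  | nil => simp [PySem.List.enumerate_nil]
  | cons x xs ih => simp [PySem.List.enumerate_cons, ih]

-- A's multisets satisfies the head/tail recursion of B's cwr
lemma multisetsA_cons (x : Int) (rest : List Int) (k : Nat) :
    multisetsA (x :: rest) (k + 1)
      = (multisetsA (x :: rest) k).map (fun t => x :: t) ++ multisetsA rest (k + 1) := by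
  conv_lhs => rw [multisetsA]
  rw [PySem.List.enumerate_cons, List.flatMap_cons]
  congr 1
  · simp
  · show (PySem.List.enumerate rest (0 + 1)).flatMap _ = _
    rw [enumerate_shift, List.flatMap_map]
    conv_rhs => rw [multisetsA]
    refine List.flatMap_congr ?_
    intro p hp
    obtain ⟨j, hj, rfl⟩ := (PySem.List.mem_enumerate_iff rest 0 p).1 hp
    simp only [zero_add]
    congr 1
    have : ((j : Int) + 1) = ((j + 1 : Nat) : Int) := by push_cast; ring
    rw [this, PySem.List.slice_from_natCast, PySem.List.slice_from_natCast]
    simp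

lemma multisetsA_eq_cwrB : ∀ (k : Nat) (items : List Int), multisetsA items k = cwrB items k := by
  intro k
  induction k with
  | zero => intro items; rw [multisetsA, cwrB]
  | succ k ih =>
    intro items
    induction items with
    | nil => rw [multisetsA, cwrB]; simp [PySem.List.enumerate_nil]
    | cons x rest ih2 => rw [multisetsA_cons, ih, ih2, cwrB]

-- the iterative product fold computes cartesianA
lemma prod_fold_eq (nt byd : PySem.Dict Int Int) (degs : List Int) (acc : List (List (Int × Int))) :
    ((degs.map (fun d =>
        (multisetsA (PySem.List.pyRange 1 (nt.getD d 0 + 1) 1) (byd.getD d 0).toNat).map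
          (fun ts => ts.map (fun t => (d, t))))).foldl
        (fun ps c => ps.flatMap (fun p => c.map (fun g => p ++ g))) acc)
      = acc.flatMap (fun p => (cartesianA nt byd degs).map (fun tail => p ++ tail)) := by
  induction degs generalizing acc with
  | nil => simp [cartesianA]
  | cons d rest ih =>
    rw [List.map_cons, List.foldl_cons, ih, cartesianA]
    simp [List.flatMap_map, List.map_flatMap, List.map_map, List.flatMap_assoc,
      Function.comp_def, List.append_assoc]

lemma foldB_eq_cart (nt byd : PySem.Dict Int Int) (degs : List Int) :
    ((degs.map (fun d =>
        (cwrB (PySem.List.pyRange 1 (nt.getD d 0 + 1) 1) (byd.getD d 0).toNat).map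
          (fun ts => ts.map (fun t => (d, t))))).foldl
        (fun ps c => ps.flatMap (fun p => c.map (fun g => p ++ g))) [[]])
      = cartesianA nt byd degs := by
  have h : (degs.map (fun d =>
        (cwrB (PySem.List.pyRange 1 (nt.getD d 0 + 1) 1) (byd.getD d 0).toNat).map
          (fun ts => ts.map (fun t => (d, t)))))
      = (degs.map (fun d =>
        (multisetsA (PySem.List.pyRange 1 (nt.getD d 0 + 1) 1) (byd.getD d 0).toNat).map
          (fun ts => ts.map (fun t => (d, t))))) := by
    simp [multisetsA_eq_cwrB]
  rw [h, prod_fold_eq]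
  simp

-- ===== VERDICT (by name: the statement is the Claim_ definition above) =====
theorem combos_for_partition_spec : Claim_equal_combos_for_partition := by
  intro partition num_transitive _ _
  unfold Spec_combos_for_partition
  simp only [combos_for_partition, combos_for_partition_alt, foldB_eq_cart]
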